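-- pv_equiv track=rewrite | github.com/mucsci-students/2025fa-420-TheBlackHatters | Controller/main_controller.py | csvToJson
-- ===== SOURCE A (Python) =====
-- def csvToJson(data):
--     # turn CSV data to json
--     schedules = []
--     current_schedule = []
--
--     for row in data:
--         if not row:
--             if current_schedule:
--                 schedules.append(current_schedule)
--                 current_schedule = []
--             continue
--
--         current_schedule.append(row)
--
--     # Add last schedule if it exists
--     if current_schedule:
--         schedules.append(current_schedule)
--
--     return schedules
-- ===== SOURCE B (Python) =====
-- from itertools import groupby
--
-- def csvToJson(data):
--     # turn CSV data to json: non-empty runs, via groupby on truthiness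
--     return [list(g) for key, g in groupby(data, key=bool) if key]
-- ===== Notes on version B (the rewrite author's own statement) =====
-- stated objective: idiomatic
-- what changed: Replaces the explicit accumulator loop with manual flushes by itertools.groupby on row truthiness, keeping only the truthy runs.
import Mathlib
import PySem

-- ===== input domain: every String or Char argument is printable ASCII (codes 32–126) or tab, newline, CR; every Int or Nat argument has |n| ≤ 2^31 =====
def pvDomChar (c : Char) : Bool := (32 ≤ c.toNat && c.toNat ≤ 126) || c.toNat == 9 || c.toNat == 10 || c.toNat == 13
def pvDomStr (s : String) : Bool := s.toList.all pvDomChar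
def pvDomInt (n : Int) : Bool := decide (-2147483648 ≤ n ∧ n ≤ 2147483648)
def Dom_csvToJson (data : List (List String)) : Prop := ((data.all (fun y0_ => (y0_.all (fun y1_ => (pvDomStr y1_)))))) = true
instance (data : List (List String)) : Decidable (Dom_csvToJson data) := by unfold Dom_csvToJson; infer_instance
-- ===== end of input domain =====

-- B replaces A's explicit accumulator-and-flush loop by grouping consecutive rows by truthiness (itertools.groupby) and keeping the truthy runs; same cost, more idiomatic.
-- ===== PORT A =====
def pvStep (st : List (List (List String)) × List (List String)) (row : List String) :
    List (List (List String)) × List (List String) :=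
  if row = [] then
    if st.2 ≠ [] then (st.1 ++ [st.2], []) else st
  else (st.1, st.2 ++ [row])

def csvToJson (data : List (List String)) : List (List (List String)) :=
  let p := data.foldl pvStep ([], [])
  -- Add last schedule if it exists
  if p.2 ≠ [] then p.1 ++ [p.2] else p.1

-- ===== PORT B =====
-- groupby(data, key=bool): each truthy run is (head :: takeWhile truthy), falsy runs are skipped
def csvToJson_alt : List (List String) → List (List (List String))
  | [] => []
  | row :: rest =>
    if row = [] then csvToJson_alt rest
    else (row :: rest.takeWhile (fun r => r ≠ [])) :: csvToJson_alt (rest.dropWhile (fun r => r ≠ []))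
termination_by data => data.length
decreasing_by
  · simp
  · simpa using Nat.lt_succ_of_le (List.length_dropWhile_le _ _)

-- ===== PRECONDITION & SPEC =====
def Spec_csvToJson (data : List (List String)) (out : List (List (List String))) : Prop := out = csvToJson_alt data
instance (data : List (List String)) (out : List (List (List String))) : Decidable (Spec_csvToJson data out) := by unfold Spec_csvToJson; infer_instance

-- ===== CLAIM (what is proved, stated in full; the proofs are below) =====
def Claim_equal_csvToJson : Prop := ∀ (data : List (List String)), Dom_csvToJson data → Spec_csvToJson data (csvToJson data)

-- ===== LEMMAS AND PROOFS =====
-- what A's loop-from-state (sched, cur) followed by the final flush produces, expressed via B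
def pvCont (cur : List (List String)) (data : List (List String)) : List (List (List String)) :=
  if cur = [] then csvToJson_alt data
  else (cur ++ data.takeWhile (fun r => r ≠ [])) :: csvToJson_alt (data.dropWhile (fun r => r ≠ []))

theorem pvLoop_eq (data : List (List String)) :
    ∀ (sched : List (List (List String))) (cur : List (List String)),
    (let p := data.foldl pvStep (sched, cur)
     if p.2 ≠ [] then p.1 ++ [p.2] else p.1) = sched ++ pvCont cur data := by
  induction data with
  | nil =>
    intro sched cur
    by_cases h : cur = [] <;> simp [pvCont, csvToJson_alt, h]
  | cons row rest ih =>
    intro sched cur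
    by_cases hr : row = []
    · by_cases hc : cur = []
      · rw [List.foldl_cons, show pvStep (sched, cur) row = (sched, cur) by simp [pvStep, hr, hc],
          ih sched cur]
        simp [pvCont, csvToJson_alt, hr, hc]
      · rw [List.foldl_cons, show pvStep (sched, cur) row = (sched ++ [cur], []) by
            simp [pvStep, hr, hc],
          ih (sched ++ [cur]) []]
        simp [pvCont, csvToJson_alt, hr, hc]
    · rw [List.foldl_cons, show pvStep (sched, cur) row = (sched, cur ++ [row]) by
          simp [pvStep, hr],
        ih sched (cur ++ [row])]
      by_cases hc : cur = [] <;>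
        simp [pvCont, csvToJson_alt, hr, hc, List.takeWhile_cons, List.dropWhile_cons]

-- ===== VERDICT (by name: the statement is the Claim_ definition above) =====
theorem csvToJson_spec : Claim_equal_csvToJson := by
  intro data _
  unfold Spec_csvToJson csvToJson
  simpa [pvCont] using pvLoop_eq data [] []
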